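-- pv_equiv track=rewrite | github.com/jiacheng-xu/neu-compression-sum | neusum/data/generate_compression_based_data.py | gen_span_segmentation
-- ===== SOURCE A (Python) =====
-- from typing import List
--
-- def gen_span_segmentation(doc_list: List[List]):
--     # generate inclusive span representation
--     point = 0
--     span_pairs = []
--     for d in doc_list:
--         l = len(d)
--         span_pairs.append([point, point + l - 1])
--         point += l
--     return span_pairs
-- ===== SOURCE B (Python) =====
-- def gen_span_segmentation(doc_list):
--     # Prefix-sum decomposition: lengths, then cumulative end offsets, then map to pairs.
--     lengths = [len(d) for d in doc_list]
--     ends = []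
--     total = 0
--     for l in lengths:
--         total += l
--         ends.append(total)
--     return [[e - l, e - 1] for e, l in zip(ends, lengths)]
-- ===== Notes on version B (the rewrite author's own statement) =====
-- stated objective: alternative
-- what changed: Replaces the single loop threading a running start offset and appending pairs with a three-stage pipeline: a lengths list, a cumulative end-offset (prefix-sum) table, and a final zip/map producing each inclusive pair [end-len, end-1].
import Mathlib
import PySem

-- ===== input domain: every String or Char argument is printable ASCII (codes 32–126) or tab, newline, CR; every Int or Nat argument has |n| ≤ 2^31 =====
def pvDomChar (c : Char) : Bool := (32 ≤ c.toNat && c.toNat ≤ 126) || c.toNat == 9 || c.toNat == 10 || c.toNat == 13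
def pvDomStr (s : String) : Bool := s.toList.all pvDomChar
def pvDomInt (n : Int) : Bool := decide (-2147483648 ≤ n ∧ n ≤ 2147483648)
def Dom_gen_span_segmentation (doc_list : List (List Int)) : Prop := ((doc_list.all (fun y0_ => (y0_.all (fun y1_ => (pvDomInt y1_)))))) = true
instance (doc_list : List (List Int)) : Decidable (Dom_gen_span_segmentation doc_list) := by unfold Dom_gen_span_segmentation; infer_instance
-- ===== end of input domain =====

-- B builds a prefix-sum table of end offsets and maps it to inclusive pairs, instead of
-- threading a running start offset while appending pairs (objective: alternative decomposition).


-- ===== PORT A =====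
-- literal transliteration: one loop, state = (point, span_pairs)
def gen_span_segmentation (doc_list : List (List Int)) : List (List Int) :=
  (doc_list.foldl
    (fun (st : Int × List (List Int)) d =>
      let l : Int := d.length
      (st.1 + l, st.2 ++ [[st.1, st.1 + l - 1]]))
    (0, [])).2

-- ===== PORT B =====
-- lengths, then cumulative end-offset table, then zip/map to inclusive pairs
def gen_span_segmentation_alt (doc_list : List (List Int)) : List (List Int) :=
  let lengths : List Int := doc_list.map (fun d => (d.length : Int))
  let ends : List Int :=
    (lengths.foldl
      (fun (st : List Int × Int) l => (st.1 ++ [st.2 + l], st.2 + l))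
      ([], 0)).1
  (ends.zip lengths).map (fun p => [p.1 - p.2, p.1 - 1])

-- ===== PRECONDITION & SPEC =====
def Spec_gen_span_segmentation (doc_list : List (List Int)) (out : List (List Int)) : Prop := out = gen_span_segmentation_alt doc_list
instance (doc_list : List (List Int)) (out : List (List Int)) : Decidable (Spec_gen_span_segmentation doc_list out) := by unfold Spec_gen_span_segmentation; infer_instance

-- ===== CLAIM (what is proved, stated in full; the proofs are below) =====
def Claim_equal_gen_span_segmentation : Prop := ∀ (doc_list : List (List Int)), Dom_gen_span_segmentation doc_list → Spec_gen_span_segmentation doc_list (gen_span_segmentation doc_list)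

-- ===== LEMMAS AND PROOFS =====

-- spans of a lengths list starting at offset t
def pvSpans (t : Int) : List Int → List (List Int)
  | [] => []
  | l :: r => [t, t + l - 1] :: pvSpans (t + l) r

-- running end offsets of a lengths list starting from total t
def pvEnds (t : Int) : List Int → List Int
  | [] => []
  | l :: r => (t + l) :: pvEnds (t + l) r

theorem pvA_fold (ds : List (List Int)) (t : Int) (acc : List (List Int)) :
    (ds.foldl
      (fun (st : Int × List (List Int)) d =>
        let l : Int := d.length
        (st.1 + l, st.2 ++ [[st.1, st.1 + l - 1]]))
      (t, acc)).2 = acc ++ pvSpans t (ds.map (fun d => (d.length : Int))) := by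
  induction ds generalizing t acc with
  | nil => simp [pvSpans]
  | cons d r ih => simp [pvSpans, ih, List.append_assoc]

theorem pvB_fold (ls : List Int) (t : Int) (acc : List Int) :
    (ls.foldl
      (fun (st : List Int × Int) l => (st.1 ++ [st.2 + l], st.2 + l))
      (acc, t)).1 = acc ++ pvEnds t ls := by
  induction ls generalizing t acc with
  | nil => simp [pvEnds]
  | cons l r ih => simp [pvEnds, ih, List.append_assoc]

theorem pvEnds_spans (ls : List Int) (t : Int) :
    ((pvEnds t ls).zip ls).map (fun p => [p.1 - p.2, p.1 - 1]) = pvSpans t ls := by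
  induction ls generalizing t with
  | nil => simp [pvEnds, pvSpans]
  | cons l r ih =>
    simp [pvEnds, pvSpans, ih]

-- ===== VERDICT (by name: the statement is the Claim_ definition above) =====
theorem gen_span_segmentation_spec : Claim_equal_gen_span_segmentation := by
  intro doc_list _
  unfold Spec_gen_span_segmentation gen_span_segmentation gen_span_segmentation_alt
  rw [pvA_fold]
  show _ = ((((doc_list.map (fun d => (d.length : Int))).foldl
      (fun (st : List Int × Int) l => (st.1 ++ [st.2 + l], st.2 + l))
      ([], 0)).1.zip (doc_list.map (fun d => (d.length : Int)))).map
        (fun p => [p.1 - p.2, p.1 - 1]))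
  rw [pvB_fold]
  simp [pvEnds_spans]
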